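-- pv_equiv track=rewrite | github.com/zziqi564-oss/mysalary-streamlit-app | app.py | categorise_job
-- ===== SOURCE A (Python) =====
-- def categorise_job(title):
--     t = title.lower()
--     if any(w in t for w in ["software", "developer", "engineer", "full stack", "front end", "back end"]):
--         return "Software Engineering"
--     elif any(w in t for w in ["data scientist", "data analyst", "data engineer", "business intelligence"]):
--         return "Data & Analytics"
--     elif any(w in t for w in ["marketing", "content", "social media", "seo"]):
--         return "Marketing"
--     elif any(w in t for w in ["financial", "accountant", "finance"]):
--         return "Finance & Accounting"
--     elif any(w in t for w in ["product manager", "project manager", "project engineer"]):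
--         return "Product & Project Mgmt"
--     elif any(w in t for w in ["sales", "business develop", "account manager"]):
--         return "Sales & Business Dev"
--     elif any(w in t for w in ["human resource", "hr ", "recruiter", "talent"]):
--         return "Human Resources"
--     elif any(w in t for w in ["operations", "supply chain", "logistics"]):
--         return "Operations"
--     elif any(w in t for w in ["director", "ceo", "cto", "cfo", "vp ", "vice president", "chief"]):
--         return "Executive / Leadership"
--     elif any(w in t for w in ["manager", "senior"]):
--         return "Management"
--     else:
--         return "Other"
-- ===== SOURCE B (Python) =====
-- # Inverted approach: instead of searching each keyword inside the title, index all
-- # keywords in a hash map (keyword -> priority group) and scan every substring of the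
-- # lowercased title whose length is a possible keyword length, keeping the best
-- # (smallest) matched group.
--
-- _CATEGORIES = [
--     "Software Engineering", "Data & Analytics", "Marketing", "Finance & Accounting",
--     "Product & Project Mgmt", "Sales & Business Dev", "Human Resources", "Operations",
--     "Executive / Leadership", "Management",
-- ]
--
-- _KEYWORD_GROUP = {
--     "software": 0, "developer": 0, "engineer": 0, "full stack": 0, "front end": 0, "back end": 0,
--     "data scientist": 1, "data analyst": 1, "data engineer": 1, "business intelligence": 1,
--     "marketing": 2, "content": 2, "social media": 2, "seo": 2,
--     "financial": 3, "accountant": 3, "finance": 3,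
--     "product manager": 4, "project manager": 4, "project engineer": 4,
--     "sales": 5, "business develop": 5, "account manager": 5,
--     "human resource": 6, "hr ": 6, "recruiter": 6, "talent": 6,
--     "operations": 7, "supply chain": 7, "logistics": 7,
--     "director": 8, "ceo": 8, "cto": 8, "cfo": 8, "vp ": 8, "vice president": 8, "chief": 8,
--     "manager": 9, "senior": 9,
-- }
--
-- # the distinct keyword lengths
-- _LENGTHS = [3, 5, 6, 7, 8, 9, 10, 12, 13, 14, 15, 16, 21]
--
--
-- def categorise_job(title):
--     t = title.lower()
--     best = len(_CATEGORIES)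
--     for i in range(len(t)):
--         for L in _LENGTHS:
--             g = _KEYWORD_GROUP.get(t[i:i + L])
--             if g is not None and g < best:
--                 best = g
--     return (_CATEGORIES + ["Other"])[best]
-- ===== Notes on version B (the rewrite author's own statement) =====
-- stated objective: alternative
-- what changed: Inverts the search: instead of testing each of the 39 keywords for containment in the title, B indexes the keywords in a hash map keyword->priority group and enumerates the lowercased title's substrings of the possible keyword lengths, keeping the smallest matched group.
import Mathlib
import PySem

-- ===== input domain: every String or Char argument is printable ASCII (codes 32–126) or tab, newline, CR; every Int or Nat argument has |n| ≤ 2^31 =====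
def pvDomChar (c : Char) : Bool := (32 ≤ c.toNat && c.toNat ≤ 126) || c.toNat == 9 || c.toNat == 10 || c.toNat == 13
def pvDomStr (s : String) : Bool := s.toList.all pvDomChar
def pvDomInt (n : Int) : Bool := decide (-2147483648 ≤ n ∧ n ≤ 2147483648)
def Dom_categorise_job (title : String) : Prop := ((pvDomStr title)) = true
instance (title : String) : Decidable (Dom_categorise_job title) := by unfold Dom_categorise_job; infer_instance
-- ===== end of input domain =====

-- B inverts the search: it indexes the 39 keywords in a hash map keyword → priority
-- group and scans every substring of the lowercased title whose length is a possible
-- keyword length, keeping the smallest matched group (objective: alternative algorithm).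

-- ===== PORT A =====
def categorise_job (title : String) : String :=
  let t := PySem.Str.lower title
  if (["software", "developer", "engineer", "full stack", "front end", "back end"]).any (fun w => PySem.Str.isIn w t) then
    "Software Engineering"
  else if (["data scientist", "data analyst", "data engineer", "business intelligence"]).any (fun w => PySem.Str.isIn w t) then
    "Data & Analytics"
  else if (["marketing", "content", "social media", "seo"]).any (fun w => PySem.Str.isIn w t) then
    "Marketing"
  else if (["financial", "accountant", "finance"]).any (fun w => PySem.Str.isIn w t) then
    "Finance & Accounting"
  else if (["product manager", "project manager", "project engineer"]).any (fun w => PySem.Str.isIn w t) then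
    "Product & Project Mgmt"
  else if (["sales", "business develop", "account manager"]).any (fun w => PySem.Str.isIn w t) then
    "Sales & Business Dev"
  else if (["human resource", "hr ", "recruiter", "talent"]).any (fun w => PySem.Str.isIn w t) then
    "Human Resources"
  else if (["operations", "supply chain", "logistics"]).any (fun w => PySem.Str.isIn w t) then
    "Operations"
  else if (["director", "ceo", "cto", "cfo", "vp ", "vice president", "chief"]).any (fun w => PySem.Str.isIn w t) then
    "Executive / Leadership"
  else if (["manager", "senior"]).any (fun w => PySem.Str.isIn w t) then
    "Management"
  else
    "Other"

-- ===== PORT B =====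
def altCats : List String :=
  ["Software Engineering", "Data & Analytics", "Marketing", "Finance & Accounting",
   "Product & Project Mgmt", "Sales & Business Dev", "Human Resources", "Operations",
   "Executive / Leadership", "Management"]

def altKw : PySem.Dict String Int := ⟨
  [("software", 0), ("developer", 0), ("engineer", 0), ("full stack", 0), ("front end", 0), ("back end", 0),
   ("data scientist", 1), ("data analyst", 1), ("data engineer", 1), ("business intelligence", 1),
   ("marketing", 2), ("content", 2), ("social media", 2), ("seo", 2),
   ("financial", 3), ("accountant", 3), ("finance", 3),
   ("product manager", 4), ("project manager", 4), ("project engineer", 4),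
   ("sales", 5), ("business develop", 5), ("account manager", 5),
   ("human resource", 6), ("hr ", 6), ("recruiter", 6), ("talent", 6),
   ("operations", 7), ("supply chain", 7), ("logistics", 7),
   ("director", 8), ("ceo", 8), ("cto", 8), ("cfo", 8), ("vp ", 8), ("vice president", 8), ("chief", 8),
   ("manager", 9), ("senior", 9)]⟩

-- the distinct keyword lengths
def altLens : List Int := [3, 5, 6, 7, 8, 9, 10, 12, 13, 14, 15, 16, 21]

def categorise_job_alt (title : String) : String :=
  let t := PySem.Str.lower title
  let best := (PySem.List.pyRange 0 (PySem.Str.len t) 1).foldl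
    (fun best i => altLens.foldl
      (fun best L =>
        match PySem.Dict.get? altKw (PySem.Str.slice t (some i) (some (i + L))) with
        | some g => if g < best then g else best
        | none => best) best)
    ((altCats.length : Int))
  PySem.List.pyGetD (altCats ++ ["Other"]) best ""

-- ===== PRECONDITION & SPEC =====
def Spec_categorise_job (title : String) (out : String) : Prop := out = categorise_job_alt title
instance (title : String) (out : String) : Decidable (Spec_categorise_job title out) := by unfold Spec_categorise_job; infer_instance

-- ===== CLAIM =====
def Claim_equal_categorise_job : Prop := ∀ (title : String), Dom_categorise_job title → Spec_categorise_job title (categorise_job title)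

-- ===== LEMMAS AND PROOFS =====

-- the multiset of group indices hit by B's substring scan
def hitsOf (t : String) : List Int :=
  (PySem.List.pyRange 0 (PySem.Str.len t) 1).flatMap
    (fun i => altLens.filterMap
      (fun L => PySem.Dict.get? altKw (PySem.Str.slice t (some i) (some (i + L)))))

theorem if_lt_eq_min (b g : Int) : (if g < b then g else b) = min b g := by
  rw [min_def]; split_ifs <;> omega

theorem foldl_optmin {α : Type} (f : α → Option Int) :
    ∀ (xs : List α) (b : Int),
      xs.foldl (fun b x => match f x with | some g => if g < b then g else b | none => b) b
        = (xs.filterMap f).foldl min b := by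
  intro xs
  induction xs with
  | nil => intro b; rfl
  | cons x xs ih =>
    intro b
    cases hfx : f x with
    | none => simpa [List.foldl_cons, hfx] using ih b
    | some g =>
      simp only [List.foldl_cons, hfx, List.filterMap_cons]
      rw [if_lt_eq_min]
      exact ih (min b g)

theorem foldl_min_flat {α : Type} (h : α → List Int) :
    ∀ (xs : List α) (b : Int),
      xs.foldl (fun b i => (h i).foldl min b) b = (xs.flatMap h).foldl min b := by
  intro xs
  induction xs with
  | nil => intro b; rfl
  | cons x xs ih => intro b; simp [List.flatMap_cons, List.foldl_append, ih]

theorem foldl_min_le_init : ∀ (G : List Int) (b : Int), G.foldl min b ≤ b := by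
  intro G
  induction G with
  | nil => intro b; exact le_rfl
  | cons x G ih => intro b; exact le_trans (ih (min b x)) (min_le_left _ _)

theorem foldl_min_le_mem : ∀ (G : List Int) (b x : Int), x ∈ G → G.foldl min b ≤ x := by
  intro G
  induction G with
  | nil => intro b x hx; cases hx
  | cons y G ih =>
    intro b x hx
    rcases List.mem_cons.mp hx with rfl | hx
    · exact le_trans (foldl_min_le_init G (min b x)) (min_le_right _ _)
    · exact ih (min b y) x hx

theorem foldl_min_mem_or : ∀ (G : List Int) (b : Int), G.foldl min b = b ∨ G.foldl min b ∈ G := by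
  intro G
  induction G with
  | nil => intro b; left; rfl
  | cons x G ih =>
    intro b
    rcases ih (min b x) with h | h
    · rcases min_choice b x with hm | hm
      · left; rw [List.foldl_cons, h, hm]
      · right; rw [List.foldl_cons, h, hm]; exact List.mem_cons_self
    · right; exact List.mem_cons_of_mem _ h

theorem get?_some_iff_aux (k : String) (v : Int) :
    ∀ (items : List (String × Int)), (items.map Prod.fst).Nodup →
      ((items.find? (fun p => p.1 == k)).map (fun p => p.2) = some v ↔ (k, v) ∈ items) := by
  intro items
  induction items with
  | nil => intro _; simp
  | cons p ps ih =>
    intro hnd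
    rw [List.map_cons, List.nodup_cons] at hnd
    obtain ⟨hp1, hps⟩ := hnd
    cases hpk : (p.1 == k) with
    | true =>
      have hk : p.1 = k := by simpa using hpk
      subst hk
      simp only [List.find?, hpk, Option.map_some, Option.some.injEq, List.mem_cons]
      constructor
      · intro hv; left; rw [← hv]
      · rintro (h | h)
        · exact (congrArg Prod.snd h).symm
        · exact absurd (List.mem_map_of_mem (f := Prod.fst) h) (by simpa using hp1)
    | false =>
      have hk : p.1 ≠ k := by simpa using hpk
      simp only [List.find?, hpk, List.mem_cons]
      rw [ih hps]
      constructor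
      · exact fun h => Or.inr h
      · rintro (h | h)
        · exact absurd (congrArg Prod.fst h).symm hk
        · exact h

theorem get?_some_iff (k : String) (v : Int) :
    PySem.Dict.get? altKw k = some v ↔ (k, v) ∈ altKw.items := by
  exact get?_some_iff_aux k v altKw.items (by decide)

theorem altKw_facts : ∀ p ∈ altKw.items,
    p.1.toList ≠ [] ∧ ((p.1.toList.length : Int)) ∈ altLens ∧ 0 ≤ p.2 ∧ p.2 ≤ 9 := by
  decide

theorem altLens_pos : ∀ L ∈ altLens, 0 < L := by decide

theorem occ_iff (t kw : String) (hne : kw.toList ≠ [])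
    (hlen : ((kw.toList.length : Int)) ∈ altLens) :
    (∃ i ∈ PySem.List.pyRange 0 (PySem.Str.len t) 1, ∃ L ∈ altLens,
       PySem.Str.slice t (some i) (some (i + L)) = kw) ↔ PySem.Str.isIn kw t = true := by
  have hlt : PySem.Str.len t = (t.toList.length : Int) := by simp [pysem]
  constructor
  · rintro ⟨i, hi, L, hL, hs⟩
    rw [PySem.Str.isIn_iff_infix]
    have h0L : 0 < L := altLens_pos L hL
    rw [hlt, PySem.List.mem_pyRange_one] at hi
    have hlist : PySem.List.slice t.toList (some i) (some (i + L)) = kw.toList := by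
      rw [← PySem.Chars.slice_eq_listSlice, ← PySem.Str.toList_slice, hs]
    rw [PySem.List.slice_toNat t.toList (a := i) (b := i + L) (by omega) (by omega)] at hlist
    rw [← hlist]
    exact ((List.take_prefix _ _).isInfix).trans ((List.drop_suffix _ _).isInfix)
  · intro hin
    obtain ⟨j, hpre⟩ := (PySem.Chars.exists_prefix_drop_iff_isIn kw.toList t.toList).mpr
      (by simpa using hin)
    have hjlt : j < t.toList.length := by
      by_contra h
      have hd : t.toList.drop j = [] := List.drop_eq_nil_of_le (by omega)
      rw [hd] at hpre
      exact hne (List.prefix_nil.mp hpre)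
    refine ⟨(j : Int), ?_, (kw.toList.length : Int), hlen, ?_⟩
    · rw [hlt, PySem.List.mem_pyRange_one]
      constructor <;> [positivity; exact_mod_cast hjlt]
    · refine String.toList_inj.mp ?_
      rw [PySem.Str.toList_slice, PySem.Chars.slice_eq_listSlice]
      rw [PySem.List.slice_toNat t.toList (a := (j : Int)) (b := (j : Int) + (kw.toList.length : Int))
        (by positivity) (by positivity)]
      have harith : (((j : Int)) + ((kw.toList.length : Int))).toNat - ((j : Int)).toNat
          = kw.toList.length := by omega
      have hj : ((j : Int)).toNat = j := by omega
      rw [harith, hj]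
      exact (List.prefix_iff_eq_take.mp hpre).symm

theorem mem_hits (t : String) (g : Int) :
    g ∈ hitsOf t ↔ ∃ p ∈ altKw.items, p.2 = g ∧ PySem.Str.isIn p.1 t = true := by
  unfold hitsOf
  rw [List.mem_flatMap]
  constructor
  · rintro ⟨i, hi, hg⟩
    rw [List.mem_filterMap] at hg
    obtain ⟨L, hL, hget⟩ := hg
    rw [get?_some_iff] at hget
    refine ⟨_, hget, rfl, ?_⟩
    have hf := altKw_facts _ hget
    exact (occ_iff t _ hf.1 hf.2.1).mp ⟨i, hi, L, hL, rfl⟩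
  · rintro ⟨p, hp, hpg, hin⟩
    have hf := altKw_facts _ hp
    obtain ⟨i, hi, L, hL, hs⟩ := (occ_iff t p.1 hf.1 hf.2.1).mpr hin
    refine ⟨i, hi, ?_⟩
    rw [List.mem_filterMap]
    refine ⟨L, hL, ?_⟩
    rw [hs, get?_some_iff, ← hpg]
    exact hp

theorem alt_eq (title : String) : categorise_job_alt title =
    PySem.List.pyGetD (altCats ++ ["Other"]) ((hitsOf (PySem.Str.lower title)).foldl min 10) "" := by
  unfold categorise_job_alt hitsOf
  simp only [foldl_optmin, foldl_min_flat]
  norm_num [altCats]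

theorem hits_range (t : String) : ∀ g ∈ hitsOf t, 0 ≤ g ∧ g ≤ 9 := by
  intro g hg
  obtain ⟨p, hp, hpg, -⟩ := (mem_hits t g).mp hg
  have := (altKw_facts p hp).2.2
  omega


-- the keywords of one priority group, read off the keyword index
def grp (g : Int) : List String :=
  altKw.items.filterMap (fun p => if p.2 = g then some p.1 else none)

theorem bridge (t : String) (g : Int) :
    (g ∈ hitsOf t) ↔ ((grp g).any (fun w => PySem.Str.isIn w t) = true) := by
  rw [mem_hits, List.any_eq_true]
  constructor
  · rintro ⟨p, hp, hpg, hin⟩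
    exact ⟨p.1, List.mem_filterMap.mpr ⟨p, hp, by rw [hpg]; simp⟩, hin⟩
  · rintro ⟨w, hw, hin⟩
    obtain ⟨p, hp, hif⟩ := List.mem_filterMap.mp hw
    by_cases h : p.2 = g
    · simp only [h, if_pos] at hif
      obtain rfl : p.1 = w := by simpa using hif
      exact ⟨p, hp, h, hin⟩
    · simp [h] at hif

theorem bridge_0 (t : String) :
    (((0 : Int)) ∈ hitsOf t) ↔ ((["software", "developer", "engineer", "full stack", "front end", "back end"]).any (fun w => PySem.Str.isIn w t) = true) := by
  have h := bridge t 0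
  rw [show grp (0 : Int) = ["software", "developer", "engineer", "full stack", "front end", "back end"] from by decide] at h
  exact h

theorem bridge_1 (t : String) :
    (((1 : Int)) ∈ hitsOf t) ↔ ((["data scientist", "data analyst", "data engineer", "business intelligence"]).any (fun w => PySem.Str.isIn w t) = true) := by
  have h := bridge t 1
  rw [show grp (1 : Int) = ["data scientist", "data analyst", "data engineer", "business intelligence"] from by decide] at h
  exact h

theorem bridge_2 (t : String) :
    (((2 : Int)) ∈ hitsOf t) ↔ ((["marketing", "content", "social media", "seo"]).any (fun w => PySem.Str.isIn w t) = true) := by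
  have h := bridge t 2
  rw [show grp (2 : Int) = ["marketing", "content", "social media", "seo"] from by decide] at h
  exact h

theorem bridge_3 (t : String) :
    (((3 : Int)) ∈ hitsOf t) ↔ ((["financial", "accountant", "finance"]).any (fun w => PySem.Str.isIn w t) = true) := by
  have h := bridge t 3
  rw [show grp (3 : Int) = ["financial", "accountant", "finance"] from by decide] at h
  exact h

theorem bridge_4 (t : String) :
    (((4 : Int)) ∈ hitsOf t) ↔ ((["product manager", "project manager", "project engineer"]).any (fun w => PySem.Str.isIn w t) = true) := by
  have h := bridge t 4
  rw [show grp (4 : Int) = ["product manager", "project manager", "project engineer"] from by decide] at h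
  exact h

theorem bridge_5 (t : String) :
    (((5 : Int)) ∈ hitsOf t) ↔ ((["sales", "business develop", "account manager"]).any (fun w => PySem.Str.isIn w t) = true) := by
  have h := bridge t 5
  rw [show grp (5 : Int) = ["sales", "business develop", "account manager"] from by decide] at h
  exact h

theorem bridge_6 (t : String) :
    (((6 : Int)) ∈ hitsOf t) ↔ ((["human resource", "hr ", "recruiter", "talent"]).any (fun w => PySem.Str.isIn w t) = true) := by
  have h := bridge t 6
  rw [show grp (6 : Int) = ["human resource", "hr ", "recruiter", "talent"] from by decide] at h
  exact h

theorem bridge_7 (t : String) :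
    (((7 : Int)) ∈ hitsOf t) ↔ ((["operations", "supply chain", "logistics"]).any (fun w => PySem.Str.isIn w t) = true) := by
  have h := bridge t 7
  rw [show grp (7 : Int) = ["operations", "supply chain", "logistics"] from by decide] at h
  exact h

theorem bridge_8 (t : String) :
    (((8 : Int)) ∈ hitsOf t) ↔ ((["director", "ceo", "cto", "cfo", "vp ", "vice president", "chief"]).any (fun w => PySem.Str.isIn w t) = true) := by
  have h := bridge t 8
  rw [show grp (8 : Int) = ["director", "ceo", "cto", "cfo", "vp ", "vice president", "chief"] from by decide] at h
  exact h

theorem bridge_9 (t : String) :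
    (((9 : Int)) ∈ hitsOf t) ↔ ((["manager", "senior"]).any (fun w => PySem.Str.isIn w t) = true) := by
  have h := bridge t 9
  rw [show grp (9 : Int) = ["manager", "senior"] from by decide] at h
  exact h

-- ===== VERDICT =====
theorem categorise_job_spec : Claim_equal_categorise_job := by
  unfold Claim_equal_categorise_job
  intro title _
  show categorise_job title = categorise_job_alt title
  rw [alt_eq]
  unfold categorise_job
  have hmem := foldl_min_mem_or (hitsOf (PySem.Str.lower title)) 10
  have hle := fun g hg => foldl_min_le_mem (hitsOf (PySem.Str.lower title)) 10 g hg
  have hrange := hits_range (PySem.Str.lower title)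
  by_cases h0 : (["software", "developer", "engineer", "full stack", "front end", "back end"]).any (fun w => PySem.Str.isIn w (PySem.Str.lower title)) = true
  · rw [if_pos h0]
    have hg : ((0 : Int)) ∈ hitsOf (PySem.Str.lower title) := (bridge_0 _).mpr h0
    have hl := hle _ hg
    have hr : (List.foldl min 10 (hitsOf (PySem.Str.lower title))) = 0 := by
      rcases hmem with h | h
      · omega
      · have h09 := hrange _ h
        omega
    rw [hr]
    decide
  rw [if_neg h0]
  by_cases h1 : (["data scientist", "data analyst", "data engineer", "business intelligence"]).any (fun w => PySem.Str.isIn w (PySem.Str.lower title)) = true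
  · rw [if_pos h1]
    have hg : ((1 : Int)) ∈ hitsOf (PySem.Str.lower title) := (bridge_1 _).mpr h1
    have hl := hle _ hg
    have hr : (List.foldl min 10 (hitsOf (PySem.Str.lower title))) = 1 := by
      rcases hmem with h | h
      · omega
      · have h09 := hrange _ h
        have hne0 : (List.foldl min 10 (hitsOf (PySem.Str.lower title))) ≠ 0 := by
          intro he
          exact h0 ((bridge_0 _).mp (he ▸ h))
        omega
    rw [hr]
    decide
  rw [if_neg h1]
  by_cases h2 : (["marketing", "content", "social media", "seo"]).any (fun w => PySem.Str.isIn w (PySem.Str.lower title)) = true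
  · rw [if_pos h2]
    have hg : ((2 : Int)) ∈ hitsOf (PySem.Str.lower title) := (bridge_2 _).mpr h2
    have hl := hle _ hg
    have hr : (List.foldl min 10 (hitsOf (PySem.Str.lower title))) = 2 := by
      rcases hmem with h | h
      · omega
      · have h09 := hrange _ h
        have hne0 : (List.foldl min 10 (hitsOf (PySem.Str.lower title))) ≠ 0 := by
          intro he
          exact h0 ((bridge_0 _).mp (he ▸ h))
        have hne1 : (List.foldl min 10 (hitsOf (PySem.Str.lower title))) ≠ 1 := by
          intro he
          exact h1 ((bridge_1 _).mp (he ▸ h))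
        omega
    rw [hr]
    decide
  rw [if_neg h2]
  by_cases h3 : (["financial", "accountant", "finance"]).any (fun w => PySem.Str.isIn w (PySem.Str.lower title)) = true
  · rw [if_pos h3]
    have hg : ((3 : Int)) ∈ hitsOf (PySem.Str.lower title) := (bridge_3 _).mpr h3
    have hl := hle _ hg
    have hr : (List.foldl min 10 (hitsOf (PySem.Str.lower title))) = 3 := by
      rcases hmem with h | h
      · omega
      · have h09 := hrange _ h
        have hne0 : (List.foldl min 10 (hitsOf (PySem.Str.lower title))) ≠ 0 := by
          intro he
          exact h0 ((bridge_0 _).mp (he ▸ h))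
        have hne1 : (List.foldl min 10 (hitsOf (PySem.Str.lower title))) ≠ 1 := by
          intro he
          exact h1 ((bridge_1 _).mp (he ▸ h))
        have hne2 : (List.foldl min 10 (hitsOf (PySem.Str.lower title))) ≠ 2 := by
          intro he
          exact h2 ((bridge_2 _).mp (he ▸ h))
        omega
    rw [hr]
    decide
  rw [if_neg h3]
  by_cases h4 : (["product manager", "project manager", "project engineer"]).any (fun w => PySem.Str.isIn w (PySem.Str.lower title)) = true
  · rw [if_pos h4]
    have hg : ((4 : Int)) ∈ hitsOf (PySem.Str.lower title) := (bridge_4 _).mpr h4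
    have hl := hle _ hg
    have hr : (List.foldl min 10 (hitsOf (PySem.Str.lower title))) = 4 := by
      rcases hmem with h | h
      · omega
      · have h09 := hrange _ h
        have hne0 : (List.foldl min 10 (hitsOf (PySem.Str.lower title))) ≠ 0 := by
          intro he
          exact h0 ((bridge_0 _).mp (he ▸ h))
        have hne1 : (List.foldl min 10 (hitsOf (PySem.Str.lower title))) ≠ 1 := by
          intro he
          exact h1 ((bridge_1 _).mp (he ▸ h))
        have hne2 : (List.foldl min 10 (hitsOf (PySem.Str.lower title))) ≠ 2 := by
          intro he
          exact h2 ((bridge_2 _).mp (he ▸ h))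
        have hne3 : (List.foldl min 10 (hitsOf (PySem.Str.lower title))) ≠ 3 := by
          intro he
          exact h3 ((bridge_3 _).mp (he ▸ h))
        omega
    rw [hr]
    decide
  rw [if_neg h4]
  by_cases h5 : (["sales", "business develop", "account manager"]).any (fun w => PySem.Str.isIn w (PySem.Str.lower title)) = true
  · rw [if_pos h5]
    have hg : ((5 : Int)) ∈ hitsOf (PySem.Str.lower title) := (bridge_5 _).mpr h5
    have hl := hle _ hg
    have hr : (List.foldl min 10 (hitsOf (PySem.Str.lower title))) = 5 := by
      rcases hmem with h | h
      · omega
      · have h09 := hrange _ h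
        have hne0 : (List.foldl min 10 (hitsOf (PySem.Str.lower title))) ≠ 0 := by
          intro he
          exact h0 ((bridge_0 _).mp (he ▸ h))
        have hne1 : (List.foldl min 10 (hitsOf (PySem.Str.lower title))) ≠ 1 := by
          intro he
          exact h1 ((bridge_1 _).mp (he ▸ h))
        have hne2 : (List.foldl min 10 (hitsOf (PySem.Str.lower title))) ≠ 2 := by
          intro he
          exact h2 ((bridge_2 _).mp (he ▸ h))
        have hne3 : (List.foldl min 10 (hitsOf (PySem.Str.lower title))) ≠ 3 := by
          intro he
          exact h3 ((bridge_3 _).mp (he ▸ h))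
        have hne4 : (List.foldl min 10 (hitsOf (PySem.Str.lower title))) ≠ 4 := by
          intro he
          exact h4 ((bridge_4 _).mp (he ▸ h))
        omega
    rw [hr]
    decide
  rw [if_neg h5]
  by_cases h6 : (["human resource", "hr ", "recruiter", "talent"]).any (fun w => PySem.Str.isIn w (PySem.Str.lower title)) = true
  · rw [if_pos h6]
    have hg : ((6 : Int)) ∈ hitsOf (PySem.Str.lower title) := (bridge_6 _).mpr h6
    have hl := hle _ hg
    have hr : (List.foldl min 10 (hitsOf (PySem.Str.lower title))) = 6 := by
      rcases hmem with h | h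
      · omega
      · have h09 := hrange _ h
        have hne0 : (List.foldl min 10 (hitsOf (PySem.Str.lower title))) ≠ 0 := by
          intro he
          exact h0 ((bridge_0 _).mp (he ▸ h))
        have hne1 : (List.foldl min 10 (hitsOf (PySem.Str.lower title))) ≠ 1 := by
          intro he
          exact h1 ((bridge_1 _).mp (he ▸ h))
        have hne2 : (List.foldl min 10 (hitsOf (PySem.Str.lower title))) ≠ 2 := by
          intro he
          exact h2 ((bridge_2 _).mp (he ▸ h))
        have hne3 : (List.foldl min 10 (hitsOf (PySem.Str.lower title))) ≠ 3 := by
          intro he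
          exact h3 ((bridge_3 _).mp (he ▸ h))
        have hne4 : (List.foldl min 10 (hitsOf (PySem.Str.lower title))) ≠ 4 := by
          intro he
          exact h4 ((bridge_4 _).mp (he ▸ h))
        have hne5 : (List.foldl min 10 (hitsOf (PySem.Str.lower title))) ≠ 5 := by
          intro he
          exact h5 ((bridge_5 _).mp (he ▸ h))
        omega
    rw [hr]
    decide
  rw [if_neg h6]
  by_cases h7 : (["operations", "supply chain", "logistics"]).any (fun w => PySem.Str.isIn w (PySem.Str.lower title)) = true
  · rw [if_pos h7]
    have hg : ((7 : Int)) ∈ hitsOf (PySem.Str.lower title) := (bridge_7 _).mpr h7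
    have hl := hle _ hg
    have hr : (List.foldl min 10 (hitsOf (PySem.Str.lower title))) = 7 := by
      rcases hmem with h | h
      · omega
      · have h09 := hrange _ h
        have hne0 : (List.foldl min 10 (hitsOf (PySem.Str.lower title))) ≠ 0 := by
          intro he
          exact h0 ((bridge_0 _).mp (he ▸ h))
        have hne1 : (List.foldl min 10 (hitsOf (PySem.Str.lower title))) ≠ 1 := by
          intro he
          exact h1 ((bridge_1 _).mp (he ▸ h))
        have hne2 : (List.foldl min 10 (hitsOf (PySem.Str.lower title))) ≠ 2 := by
          intro he
          exact h2 ((bridge_2 _).mp (he ▸ h))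
        have hne3 : (List.foldl min 10 (hitsOf (PySem.Str.lower title))) ≠ 3 := by
          intro he
          exact h3 ((bridge_3 _).mp (he ▸ h))
        have hne4 : (List.foldl min 10 (hitsOf (PySem.Str.lower title))) ≠ 4 := by
          intro he
          exact h4 ((bridge_4 _).mp (he ▸ h))
        have hne5 : (List.foldl min 10 (hitsOf (PySem.Str.lower title))) ≠ 5 := by
          intro he
          exact h5 ((bridge_5 _).mp (he ▸ h))
        have hne6 : (List.foldl min 10 (hitsOf (PySem.Str.lower title))) ≠ 6 := by
          intro he
          exact h6 ((bridge_6 _).mp (he ▸ h))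
        omega
    rw [hr]
    decide
  rw [if_neg h7]
  by_cases h8 : (["director", "ceo", "cto", "cfo", "vp ", "vice president", "chief"]).any (fun w => PySem.Str.isIn w (PySem.Str.lower title)) = true
  · rw [if_pos h8]
    have hg : ((8 : Int)) ∈ hitsOf (PySem.Str.lower title) := (bridge_8 _).mpr h8
    have hl := hle _ hg
    have hr : (List.foldl min 10 (hitsOf (PySem.Str.lower title))) = 8 := by
      rcases hmem with h | h
      · omega
      · have h09 := hrange _ h
        have hne0 : (List.foldl min 10 (hitsOf (PySem.Str.lower title))) ≠ 0 := by
          intro he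
          exact h0 ((bridge_0 _).mp (he ▸ h))
        have hne1 : (List.foldl min 10 (hitsOf (PySem.Str.lower title))) ≠ 1 := by
          intro he
          exact h1 ((bridge_1 _).mp (he ▸ h))
        have hne2 : (List.foldl min 10 (hitsOf (PySem.Str.lower title))) ≠ 2 := by
          intro he
          exact h2 ((bridge_2 _).mp (he ▸ h))
        have hne3 : (List.foldl min 10 (hitsOf (PySem.Str.lower title))) ≠ 3 := by
          intro he
          exact h3 ((bridge_3 _).mp (he ▸ h))
        have hne4 : (List.foldl min 10 (hitsOf (PySem.Str.lower title))) ≠ 4 := by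
          intro he
          exact h4 ((bridge_4 _).mp (he ▸ h))
        have hne5 : (List.foldl min 10 (hitsOf (PySem.Str.lower title))) ≠ 5 := by
          intro he
          exact h5 ((bridge_5 _).mp (he ▸ h))
        have hne6 : (List.foldl min 10 (hitsOf (PySem.Str.lower title))) ≠ 6 := by
          intro he
          exact h6 ((bridge_6 _).mp (he ▸ h))
        have hne7 : (List.foldl min 10 (hitsOf (PySem.Str.lower title))) ≠ 7 := by
          intro he
          exact h7 ((bridge_7 _).mp (he ▸ h))
        omega
    rw [hr]
    decide
  rw [if_neg h8]
  by_cases h9 : (["manager", "senior"]).any (fun w => PySem.Str.isIn w (PySem.Str.lower title)) = true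
  · rw [if_pos h9]
    have hg : ((9 : Int)) ∈ hitsOf (PySem.Str.lower title) := (bridge_9 _).mpr h9
    have hl := hle _ hg
    have hr : (List.foldl min 10 (hitsOf (PySem.Str.lower title))) = 9 := by
      rcases hmem with h | h
      · omega
      · have h09 := hrange _ h
        have hne0 : (List.foldl min 10 (hitsOf (PySem.Str.lower title))) ≠ 0 := by
          intro he
          exact h0 ((bridge_0 _).mp (he ▸ h))
        have hne1 : (List.foldl min 10 (hitsOf (PySem.Str.lower title))) ≠ 1 := by
          intro he
          exact h1 ((bridge_1 _).mp (he ▸ h))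
        have hne2 : (List.foldl min 10 (hitsOf (PySem.Str.lower title))) ≠ 2 := by
          intro he
          exact h2 ((bridge_2 _).mp (he ▸ h))
        have hne3 : (List.foldl min 10 (hitsOf (PySem.Str.lower title))) ≠ 3 := by
          intro he
          exact h3 ((bridge_3 _).mp (he ▸ h))
        have hne4 : (List.foldl min 10 (hitsOf (PySem.Str.lower title))) ≠ 4 := by
          intro he
          exact h4 ((bridge_4 _).mp (he ▸ h))
        have hne5 : (List.foldl min 10 (hitsOf (PySem.Str.lower title))) ≠ 5 := by
          intro he
          exact h5 ((bridge_5 _).mp (he ▸ h))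
        have hne6 : (List.foldl min 10 (hitsOf (PySem.Str.lower title))) ≠ 6 := by
          intro he
          exact h6 ((bridge_6 _).mp (he ▸ h))
        have hne7 : (List.foldl min 10 (hitsOf (PySem.Str.lower title))) ≠ 7 := by
          intro he
          exact h7 ((bridge_7 _).mp (he ▸ h))
        have hne8 : (List.foldl min 10 (hitsOf (PySem.Str.lower title))) ≠ 8 := by
          intro he
          exact h8 ((bridge_8 _).mp (he ▸ h))
        omega
    rw [hr]
    decide
  rw [if_neg h9]
  have hr : (List.foldl min 10 (hitsOf (PySem.Str.lower title))) = 10 := by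
    rcases hmem with h | h
    · exact h
    · have h09 := hrange _ h
      have hne0 : (List.foldl min 10 (hitsOf (PySem.Str.lower title))) ≠ 0 := by
        intro he
        exact h0 ((bridge_0 _).mp (he ▸ h))
      have hne1 : (List.foldl min 10 (hitsOf (PySem.Str.lower title))) ≠ 1 := by
        intro he
        exact h1 ((bridge_1 _).mp (he ▸ h))
      have hne2 : (List.foldl min 10 (hitsOf (PySem.Str.lower title))) ≠ 2 := by
        intro he
        exact h2 ((bridge_2 _).mp (he ▸ h))
      have hne3 : (List.foldl min 10 (hitsOf (PySem.Str.lower title))) ≠ 3 := by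
        intro he
        exact h3 ((bridge_3 _).mp (he ▸ h))
      have hne4 : (List.foldl min 10 (hitsOf (PySem.Str.lower title))) ≠ 4 := by
        intro he
        exact h4 ((bridge_4 _).mp (he ▸ h))
      have hne5 : (List.foldl min 10 (hitsOf (PySem.Str.lower title))) ≠ 5 := by
        intro he
        exact h5 ((bridge_5 _).mp (he ▸ h))
      have hne6 : (List.foldl min 10 (hitsOf (PySem.Str.lower title))) ≠ 6 := by
        intro he
        exact h6 ((bridge_6 _).mp (he ▸ h))
      have hne7 : (List.foldl min 10 (hitsOf (PySem.Str.lower title))) ≠ 7 := by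
        intro he
        exact h7 ((bridge_7 _).mp (he ▸ h))
      have hne8 : (List.foldl min 10 (hitsOf (PySem.Str.lower title))) ≠ 8 := by
        intro he
        exact h8 ((bridge_8 _).mp (he ▸ h))
      have hne9 : (List.foldl min 10 (hitsOf (PySem.Str.lower title))) ≠ 9 := by
        intro he
        exact h9 ((bridge_9 _).mp (he ▸ h))
      omega
  rw [hr]
  decide
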